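-- pv_equiv track=rewrite | github.com/MedICL-VU/OCT-Inpainting | UNet2p5D/save_inpainted.py | get_contiguous_missing_regions
-- ===== SOURCE A (Python) =====
-- def get_contiguous_missing_regions(mask):
--     """
--     Given a 1D binary mask (1 = missing), return a list of contiguous missing regions.
--     Each region is a list of indices.
--     """
--     regions = []
--     current = []
--
--     for i, val in enumerate(mask):
--         if val == 1:
--             current.append(i)
--         elif current:
--             regions.append(current)
--             current = []
--     if current:
--         regions.append(current)
--
--     return regions
-- ===== SOURCE B (Python) =====
-- def get_contiguous_missing_regions(mask):
--     """
--     Given a 1D binary mask (1 = missing), return a list of contiguous missing regions.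
--     Each region is a list of indices.
--     Run-scanning rewrite: two pointers consume one maximal run of equal values
--     at a time and emit range(i, j) for each run of 1s.
--     """
--     regions = []
--     i, n = 0, len(mask)
--     while i < n:
--         j = i + 1
--         while j < n and mask[j] == mask[i]:
--             j += 1
--         if mask[i] == 1:
--             regions.append(list(range(i, j)))
--         i = j
--     return regions
-- ===== Notes on version B (the rewrite author's own statement) =====
-- stated objective: alternative
-- what changed: Replaces A's per-element accumulator with trailing flush by a run-scanning recursion that consumes one maximal run of equal values at a time and emits range(offset, offset+k) for each run of 1s.
import Mathlib
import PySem

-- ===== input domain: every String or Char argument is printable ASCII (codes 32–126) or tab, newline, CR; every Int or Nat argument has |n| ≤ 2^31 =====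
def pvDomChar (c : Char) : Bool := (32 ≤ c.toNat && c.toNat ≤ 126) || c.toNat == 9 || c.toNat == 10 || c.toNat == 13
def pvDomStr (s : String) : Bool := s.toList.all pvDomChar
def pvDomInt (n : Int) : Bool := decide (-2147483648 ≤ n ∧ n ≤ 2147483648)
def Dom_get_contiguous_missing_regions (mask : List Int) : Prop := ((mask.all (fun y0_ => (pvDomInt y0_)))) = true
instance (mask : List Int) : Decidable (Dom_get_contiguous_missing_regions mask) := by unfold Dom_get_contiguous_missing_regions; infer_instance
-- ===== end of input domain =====

-- B changes the algorithm: a run-scanning recursion (one maximal run of equal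
-- values at a time) instead of A's per-element accumulator with trailing flush.

-- ===== PORT A =====
-- literal port of A: fold over enumerate(mask) with state (regions, current), then flush current
def get_contiguous_missing_regions (mask : List Int) : List (List Int) :=
  let st := (PySem.List.enumerate mask 0).foldl
    (fun (s : List (List Int) × List Int) p =>
      if p.2 = 1 then (s.1, s.2 ++ [p.1])
      else if s.2 ≠ [] then (s.1 ++ [s.2], ([] : List Int))
      else (s.1, s.2))
    ([], [])
  if st.2 ≠ [] then st.1 ++ [st.2] else st.1

-- ===== PORT B =====
-- inner while loop of Source B: length of the run of values equal to v in the tail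
def pvRunLen (v : Int) : List Int → Nat
  | [] => 0
  | w :: t => if w = v then 1 + pvRunLen v t else 0

theorem pvRunLen_le (v : Int) : ∀ t : List Int, pvRunLen v t ≤ t.length := by
  intro t; induction t with
  | nil => simp [pvRunLen]
  | cons w t ih => simp only [pvRunLen, List.length_cons]; split <;> omega

-- go(offset, rest) of Source B
def pvGo (offset : Int) (rest : List Int) : List (List Int) :=
  match rest with
  | [] => []
  | v :: t =>
    let k := 1 + pvRunLen v t
    (if v = 1 then [PySem.List.pyRange offset (offset + (k : Int)) 1] else [])
      ++ pvGo (offset + (k : Int)) (List.drop k (v :: t))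
termination_by rest.length
decreasing_by
  have := pvRunLen_le v t
  simp only [List.length_drop, List.length_cons]
  omega

def get_contiguous_missing_regions_alt (mask : List Int) : List (List Int) :=
  pvGo 0 mask

-- ===== PRECONDITION & SPEC =====
def Spec_get_contiguous_missing_regions (mask : List Int) (out : List (List Int)) : Prop := out = get_contiguous_missing_regions_alt mask
instance (mask : List Int) (out : List (List Int)) : Decidable (Spec_get_contiguous_missing_regions mask out) := by unfold Spec_get_contiguous_missing_regions; infer_instance

-- ===== CLAIM (what is proved, stated in full; the proofs are below) =====
def Claim_equal_get_contiguous_missing_regions : Prop := ∀ (mask : List Int), Dom_get_contiguous_missing_regions mask → Spec_get_contiguous_missing_regions mask (get_contiguous_missing_regions mask)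

-- ===== LEMMAS AND PROOFS =====

-- common reference recursion: S i cur l = regions still to be produced, given
-- that the indices in cur are the current run of 1s and l starts at index i
def pvS : Int → List Int → List Int → List (List Int)
  | _, cur, [] => if cur = [] then [] else [cur]
  | i, cur, v :: rest =>
    if v = 1 then pvS (i+1) (cur ++ [i]) rest
    else (if cur = [] then [] else [cur]) ++ pvS (i+1) [] rest

-- A's fold+flush equals pvS
theorem pvA_eq_S : ∀ (l : List Int) (i : Int) (regs : List (List Int)) (cur : List Int),
    (let st := (PySem.List.enumerate l i).foldl
      (fun (s : List (List Int) × List Int) p =>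
        if p.2 = 1 then (s.1, s.2 ++ [p.1])
        else if s.2 ≠ [] then (s.1 ++ [s.2], ([] : List Int))
        else (s.1, s.2))
      (regs, cur)
     if st.2 ≠ [] then st.1 ++ [st.2] else st.1) = regs ++ pvS i cur l := by
  intro l
  induction l with
  | nil =>
    intro i regs cur
    simp only [PySem.List.enumerate_nil, List.foldl_nil, pvS]
    by_cases h : cur = [] <;> simp [h]
  | cons v t ih =>
    intro i regs cur
    rw [PySem.List.enumerate_cons, List.foldl_cons]
    simp only [pvS]
    by_cases hv : v = 1
    · simp only [hv]
      exact ih (i+1) regs (cur ++ [i])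
    · simp only [if_neg hv]
      by_cases hc : cur = []
      · simp only [hc]
        simpa using ih (i+1) regs []
      · have hc' : cur ≠ [] := hc
        rw [if_pos hc']
        rw [ih (i+1) (regs ++ [cur]) []]
        simp [hc]

-- characterisation of pvRunLen: the scanned prefix is a run of v …
theorem pvRunLen_take (v : Int) : ∀ t : List Int,
    t.take (pvRunLen v t) = List.replicate (pvRunLen v t) v := by
  intro t; induction t with
  | nil => simp [pvRunLen]
  | cons w t ih =>
    by_cases h : w = v
    · subst h
      simp only [pvRunLen]
      rw [show 1 + pvRunLen w t = pvRunLen w t + 1 by omega]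
      simp [List.replicate_succ, ih]
    · simp [pvRunLen, h]

-- … and the element after it (if any) is not v
theorem pvRunLen_drop_head (v : Int) : ∀ (t : List Int) (w : Int) (d : List Int),
    t.drop (pvRunLen v t) = w :: d → w ≠ v := by
  intro t; induction t with
  | nil => intro w d h; simp [pvRunLen] at h
  | cons x t ih =>
    intro w d h
    by_cases hx : x = v
    · subst hx
      have e : pvRunLen x (x :: t) = pvRunLen x t + 1 := by simp [pvRunLen, Nat.add_comm]
      rw [e, List.drop_succ_cons] at h
      exact ih w d h
    · simp [pvRunLen, hx] at h; rw [← h.1]; exact hx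

-- pvS over a run of 1s extends cur by the corresponding index range
theorem pvS_ones : ∀ (r : Nat) (i : Int) (cur rest : List Int),
    pvS i cur (List.replicate r 1 ++ rest)
      = pvS (i + r) (cur ++ PySem.List.pyRange i (i + r) 1) rest := by
  intro r
  induction r with
  | zero => intro i cur rest; simp [PySem.List.pyRange_one_eq_nil]
  | succ r ih =>
    intro i cur rest
    rw [List.replicate_succ, List.cons_append]
    simp only [pvS]
    rw [ih (i+1) (cur ++ [i]) rest]
    rw [PySem.List.pyRange_one_cons (by omega : i < i + (r+1 : Nat))]
    have : i + 1 + (r : Int) = i + ((r : Nat) + 1 : Nat) := by push_cast; ring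
    rw [← this]
    simp

-- pvS with empty cur skips a run of non-1s
theorem pvS_skip (v : Int) (hv : v ≠ 1) : ∀ (r : Nat) (i : Int) (rest : List Int),
    pvS i [] (List.replicate r v ++ rest) = pvS (i + r) [] rest := by
  intro r
  induction r with
  | zero => intro i rest; simp
  | succ r ih =>
    intro i rest
    rw [List.replicate_succ, List.cons_append]
    have h1 : pvS i [] (v :: (List.replicate r v ++ rest)) = pvS (i+1) [] (List.replicate r v ++ rest) := by
      simp [pvS, hv]
    rw [h1, ih (i+1) rest, show i + 1 + (r : Int) = i + (((r : Nat) + 1 : Nat) : Int) by push_cast; ring]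

-- flushing a nonempty cur in front of a non-1 element
theorem pvS_flush (i : Int) (cur : List Int) (hc : cur ≠ []) (w : Int) (hw : w ≠ 1)
    (d : List Int) : pvS i cur (w :: d) = cur :: pvS i [] (w :: d) := by
  simp [pvS, hw, hc]

-- B's go equals pvS with empty cur (induction on a length bound: go consumes a whole run per step)
theorem pvGo_eq_S_aux : ∀ (n : Nat) (l : List Int), l.length ≤ n → ∀ i : Int, pvGo i l = pvS i [] l := by
  intro n
  induction n with
  | zero =>
    intro l hl i
    have : l = [] := List.eq_nil_of_length_eq_zero (Nat.le_zero.mp hl)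
    subst this
    simp [pvGo, pvS]
  | succ n ih =>
    intro l hl i
    match l with
    | [] => simp [pvGo, pvS]
    | v :: t =>
      have ht : t.length ≤ n := by simpa using hl
      set r := pvRunLen v t with hr
      set d := t.drop r with hd
      have htake : List.take r t = List.replicate r v := by rw [hr]; exact pvRunLen_take v t
      have htd : t = List.replicate r v ++ d := by
        rw [← htake, hd, List.take_append_drop]
      have hdl : d.length ≤ n := le_trans (by simp [hd]) ht
      have hdrop : List.drop (1 + r) (v :: t) = d := by
        have e : (1 + r) = r + 1 := by omega
        rw [e, List.drop_succ_cons]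
      have hcast : i + ((1 + r : Nat) : Int) = i + 1 + (r : Int) := by push_cast; ring
      rw [pvGo, ← hr]
      simp only [hdrop]
      by_cases hv : v = 1
      · subst hv
        have hrhs : pvS i [] (1 :: t) = pvS (i + 1 + r) (PySem.List.pyRange i (i + 1 + r) 1) d := by
          conv_lhs => rw [htd]
          show pvS i [] (1 :: (List.replicate r 1 ++ d)) = _
          rw [show (1 : Int) :: (List.replicate r 1 ++ d) = List.replicate (r + 1) 1 ++ d by
            simp [List.replicate_succ]]
          rw [pvS_ones (r + 1) i [] d]
          have e : i + (((r : Nat) + 1 : Nat) : Int) = i + 1 + (r : Int) := by push_cast; ring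
          rw [e]
          simp
        rw [hrhs, if_pos rfl, hcast]
        have hcur : PySem.List.pyRange i (i + 1 + r) 1 ≠ [] := by
          rw [PySem.List.pyRange_one_cons (by omega : i < i + 1 + (r:Int))]
          exact List.cons_ne_nil _ _
        match hD : d with
        | [] =>
          rw [pvGo]
          simp [pvS, hcur]
        | w :: d' =>
          have hw : w ≠ 1 := by
            apply pvRunLen_drop_head 1 t w d'
            rw [← hr]
            exact hd.symm
          rw [pvS_flush _ _ hcur w hw d']
          rw [ih (w :: d') (by simpa [hD] using hdl) (i + 1 + r)]
          simp
      · rw [if_neg hv]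
        have hrhs : pvS i [] (v :: t) = pvS (i + 1 + r) [] d := by
          conv_lhs => rw [htd]
          show pvS i [] (v :: (List.replicate r v ++ d)) = _
          rw [show pvS i [] (v :: (List.replicate r v ++ d))
                = pvS (i + 1) [] (List.replicate r v ++ d) from by simp [pvS, hv]]
          rw [pvS_skip v hv r (i + 1) d]
        rw [hrhs, hcast, ih d hdl (i + 1 + r)]
        simp

theorem pvGo_eq_S (l : List Int) (i : Int) : pvGo i l = pvS i [] l :=
  pvGo_eq_S_aux l.length l le_rfl i

-- ===== VERDICT (by name: the statement is the Claim_ definition above) =====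
theorem get_contiguous_missing_regions_spec : Claim_equal_get_contiguous_missing_regions := by
  intro mask _
  unfold Spec_get_contiguous_missing_regions get_contiguous_missing_regions get_contiguous_missing_regions_alt
  rw [pvGo_eq_S]
  simpa using pvA_eq_S mask 0 [] []
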